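-- pv_equiv track=rewrite | github.com/aidsuu/penq-pennylane | lattice_geometry_utils.py | cubic_z_pairs
-- ===== SOURCE A (Python) =====
-- def cubic_site_index(x, y, z, Lx, Ly, Lz):
--     if Lx < 1 or Ly < 1 or Lz < 1:
--         raise ValueError("Lx, Ly, and Lz must be positive integers.")
--     if x < 0 or y < 0 or z < 0 or x >= Lx or y >= Ly or z >= Lz:
--         raise ValueError("cubic_site_index received out-of-range coordinates.")
--     return int(x + Lx * y + Lx * Ly * z)
--
-- def cubic_z_pairs(Lx, Ly, Lz):
--     if Lx < 1 or Ly < 1 or Lz < 1: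
--         raise ValueError("Lx, Ly, and Lz must be positive integers.")
--     pairs = []
--     for z in range(Lz - 1):
--         for y in range(Ly):
--             for x in range(Lx):
--                 lower = cubic_site_index(x, y, z, Lx, Ly, Lz)
--                 upper = cubic_site_index(x, y, z + 1, Lx, Ly, Lz)
--                 pairs.append((lower, upper))
--     return pairs
-- ===== SOURCE B (Python) =====
-- def cubic_z_pairs(Lx, Ly, Lz):
--     if Lx < 1 or Ly < 1 or Lz < 1:
--         raise ValueError("Lx, Ly, and Lz must be positive integers.")
--     N = Lx * Ly
--     return [(i, i + N) for i in range(N * (Lz - 1))]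
-- ===== Notes on version B (the rewrite author's own statement) =====
-- stated objective: simpler
-- what changed: Replaces the three nested coordinate loops with repeated cubic_site_index calls by one flat arithmetic enumeration: the lower indices are exactly 0..Lx*Ly*(Lz-1)-1 in emission order and each upper index is lower + Lx*Ly.
import Mathlib
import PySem

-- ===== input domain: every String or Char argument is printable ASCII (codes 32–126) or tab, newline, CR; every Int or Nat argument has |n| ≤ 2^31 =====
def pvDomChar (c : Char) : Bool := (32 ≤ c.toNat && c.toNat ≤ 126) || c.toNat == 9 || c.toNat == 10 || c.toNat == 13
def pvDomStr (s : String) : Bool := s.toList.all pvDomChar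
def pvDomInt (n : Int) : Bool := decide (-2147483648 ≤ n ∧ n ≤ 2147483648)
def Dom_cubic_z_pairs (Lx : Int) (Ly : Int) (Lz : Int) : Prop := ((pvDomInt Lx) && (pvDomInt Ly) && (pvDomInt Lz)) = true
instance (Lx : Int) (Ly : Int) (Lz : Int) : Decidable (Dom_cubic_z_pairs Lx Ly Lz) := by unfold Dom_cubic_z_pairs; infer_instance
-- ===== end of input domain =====

-- B replaces the three nested loops and per-site index computations by one flat
-- arithmetic enumeration of the lower indices (objective: simpler).
-- ===== PORT A =====
-- helper: cubic_site_index; 'none' marks the inputs where the Python raises ValueError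
def cubic_site_index? (x y z Lx Ly Lz : Int) : Option Int :=
  if Lx < 1 ∨ Ly < 1 ∨ Lz < 1 then none
  else if x < 0 ∨ y < 0 ∨ z < 0 ∨ x ≥ Lx ∨ y ≥ Ly ∨ z ≥ Lz then none
  else some (x + Lx * y + Lx * Ly * z)

-- the initial 'raise' branch is excluded by Pre_; inside the loops cubic_site_index never raises
def cubic_z_pairs (Lx : Int) (Ly : Int) (Lz : Int) : List (Int × Int) :=
  if Lx < 1 ∨ Ly < 1 ∨ Lz < 1 then []
  else
    (PySem.List.pyRange 0 (Lz - 1) 1).foldl (fun pairs z =>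
      (PySem.List.pyRange 0 Ly 1).foldl (fun pairs y =>
        (PySem.List.pyRange 0 Lx 1).foldl (fun pairs x =>
          match cubic_site_index? x y z Lx Ly Lz, cubic_site_index? x y (z + 1) Lx Ly Lz with
          | some lower, some upper => pairs ++ [(lower, upper)]
          | _, _ => pairs) pairs) pairs) []

-- ===== PORT B =====
def cubic_z_pairs_alt (Lx : Int) (Ly : Int) (Lz : Int) : List (Int × Int) :=
  if Lx < 1 ∨ Ly < 1 ∨ Lz < 1 then []
  else
    (PySem.List.pyRange 0 (Lx * Ly * (Lz - 1)) 1).map (fun i => (i, i + Lx * Ly))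

-- ===== PRECONDITION & SPEC =====
-- Pre_ excludes exactly the inputs where A raises ValueError (non-positive dimensions); B raises there too.
def Pre_cubic_z_pairs (Lx : Int) (Ly : Int) (Lz : Int) : Prop := 1 ≤ Lx ∧ 1 ≤ Ly ∧ 1 ≤ Lz
instance (Lx : Int) (Ly : Int) (Lz : Int) : Decidable (Pre_cubic_z_pairs Lx Ly Lz) := by unfold Pre_cubic_z_pairs; infer_instance
def pvWitness_cubic_z_pairs : Int × Int × Int := (2, 3, 2)
def Spec_cubic_z_pairs (Lx : Int) (Ly : Int) (Lz : Int) (out : List (Int × Int)) : Prop := out = cubic_z_pairs_alt Lx Ly Lz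
instance (Lx : Int) (Ly : Int) (Lz : Int) (out : List (Int × Int)) : Decidable (Spec_cubic_z_pairs Lx Ly Lz out) := by unfold Spec_cubic_z_pairs; infer_instance

-- ===== CLAIM (what is proved, stated in full; the proofs are below) =====
def Claim_equal_cubic_z_pairs : Prop := ∀ (Lx : Int) (Ly : Int) (Lz : Int), Dom_cubic_z_pairs Lx Ly Lz → Pre_cubic_z_pairs Lx Ly Lz → Spec_cubic_z_pairs Lx Ly Lz (cubic_z_pairs Lx Ly Lz)

-- ===== LEMMAS AND PROOFS =====

-- range(0, a*b) splits into b consecutive blocks of length a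
lemma range_mul_flat_nat (a : Int) (ha : 0 ≤ a) (b : Nat) :
    PySem.List.pyRange 0 (a * (b : Int)) 1 =
      (PySem.List.pyRange 0 (b : Int) 1).flatMap
        (fun j => (PySem.List.pyRange 0 a 1).map (fun i => a * j + i)) := by
  induction b with
  | zero => simp [PySem.List.pyRange_zero]
  | succ n ih =>
      have h1 : PySem.List.pyRange 0 ((n : Int) + 1) 1 = PySem.List.pyRange 0 (n : Int) 1 ++ [(n : Int)] :=
        PySem.List.pyRange_one_succ_right (by positivity)
      have h2 : PySem.List.pyRange 0 (a * ((n : Int) + 1)) 1 =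
          PySem.List.pyRange 0 (a * (n : Int)) 1 ++ PySem.List.pyRange (a * (n : Int)) (a * ((n : Int) + 1)) 1 :=
        PySem.List.pyRange_one_append 0 (a * (n : Int)) (a * ((n : Int) + 1)) (by positivity) (by nlinarith)
      have h3 : PySem.List.pyRange (a * (n : Int)) (a * ((n : Int) + 1)) 1 =
          (PySem.List.pyRange 0 a 1).map (fun i => a * (n : Int) + i) := by
        rw [PySem.List.pyRange_one, PySem.List.pyRange_one]
        simp [List.map_map]
        congr 1
        ring_nf
      push_cast
      rw [h1, h2, h3, List.flatMap_append]
      simp [ih]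

lemma range_mul_flat (a b : Int) (ha : 0 ≤ a) (hb : 0 ≤ b) :
    PySem.List.pyRange 0 (a * b) 1 =
      (PySem.List.pyRange 0 b 1).flatMap
        (fun j => (PySem.List.pyRange 0 a 1).map (fun i => a * j + i)) := by
  obtain ⟨n, rfl⟩ := Int.eq_ofNat_of_zero_le hb
  exact range_mul_flat_nat a ha n

lemma site_some (x y z Lx Ly Lz : Int) (hLx : 1 ≤ Lx) (hLy : 1 ≤ Ly) (hLz : 1 ≤ Lz)
    (hx0 : 0 ≤ x) (hx : x < Lx) (hy0 : 0 ≤ y) (hy : y < Ly) (hz0 : 0 ≤ z) (hz : z < Lz) :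
    cubic_site_index? x y z Lx Ly Lz = some (x + Lx * y + Lx * Ly * z) := by
  unfold cubic_site_index?
  rw [if_neg (by omega), if_neg (by omega)]

-- the nested A-side loops emit the same flatMap structure
lemma loops_eq (Lx Ly Lz : Int) (hLx : 1 ≤ Lx) (hLy : 1 ≤ Ly) (hLz : 1 ≤ Lz) :
    ((PySem.List.pyRange 0 (Lz - 1) 1).foldl (fun pairs z =>
      (PySem.List.pyRange 0 Ly 1).foldl (fun pairs y =>
        (PySem.List.pyRange 0 Lx 1).foldl (fun pairs x =>
          match cubic_site_index? x y z Lx Ly Lz, cubic_site_index? x y (z + 1) Lx Ly Lz with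
          | some lower, some upper => pairs ++ [(lower, upper)]
          | _, _ => pairs) pairs) pairs) ([] : List (Int × Int))) =
    (PySem.List.pyRange 0 (Lz - 1) 1).flatMap (fun z =>
      (PySem.List.pyRange 0 Ly 1).flatMap (fun y =>
        (PySem.List.pyRange 0 Lx 1).map (fun x =>
          (x + Lx * y + Lx * Ly * z, x + Lx * y + Lx * Ly * (z + 1))))) := by
  have houter := PySem.List.foldl_congr_mem'
    (l := PySem.List.pyRange 0 (Lz - 1) 1)
    (g := fun pairs z => pairs ++ (PySem.List.pyRange 0 Ly 1).flatMap (fun y =>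
        (PySem.List.pyRange 0 Lx 1).map (fun x =>
          (x + Lx * y + Lx * Ly * z, x + Lx * y + Lx * Ly * (z + 1)))))
    (init := ([] : List (Int × Int)))
    (f := fun pairs z =>
      (PySem.List.pyRange 0 Ly 1).foldl (fun pairs y =>
        (PySem.List.pyRange 0 Lx 1).foldl (fun pairs x =>
          match cubic_site_index? x y z Lx Ly Lz, cubic_site_index? x y (z + 1) Lx Ly Lz with
          | some lower, some upper => pairs ++ [(lower, upper)]
          | _, _ => pairs) pairs) pairs)
    ?_
  · rw [houter, PySem.List.foldl_append_eq_flatMap, List.nil_append]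
  · intro z hz acc
    beta_reduce
    rw [PySem.List.mem_pyRange_one] at hz
    have hmid := PySem.List.foldl_congr_mem'
      (l := PySem.List.pyRange 0 Ly 1)
      (g := fun pairs y => pairs ++ (PySem.List.pyRange 0 Lx 1).map (fun x =>
          (x + Lx * y + Lx * Ly * z, x + Lx * y + Lx * Ly * (z + 1))))
      (init := acc)
      (f := fun pairs y =>
        (PySem.List.pyRange 0 Lx 1).foldl (fun pairs x =>
          match cubic_site_index? x y z Lx Ly Lz, cubic_site_index? x y (z + 1) Lx Ly Lz with
          | some lower, some upper => pairs ++ [(lower, upper)]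
          | _, _ => pairs) pairs)
      ?_
    · rw [hmid, PySem.List.foldl_append_eq_flatMap]
    · intro y hy acc2
      beta_reduce
      rw [PySem.List.mem_pyRange_one] at hy
      have hin := PySem.List.foldl_congr_mem'
        (l := PySem.List.pyRange 0 Lx 1)
        (g := fun pairs x => pairs ++ [(x + Lx * y + Lx * Ly * z, x + Lx * y + Lx * Ly * (z + 1))])
        (init := acc2)
        (f := fun pairs x =>
          match cubic_site_index? x y z Lx Ly Lz, cubic_site_index? x y (z + 1) Lx Ly Lz with
          | some lower, some upper => pairs ++ [(lower, upper)]
          | _, _ => pairs)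
        ?_
      · rw [hin, PySem.List.foldl_append_singleton_eq_map]
      · intro x hx acc3
        beta_reduce
        rw [PySem.List.mem_pyRange_one] at hx
        rw [site_some x y z Lx Ly Lz hLx hLy hLz hx.1 hx.2 hy.1 hy.2 hz.1 (by omega),
            site_some x y (z + 1) Lx Ly Lz hLx hLy hLz hx.1 hx.2 hy.1 hy.2 (by omega) (by omega)]

-- the flat B-side enumeration, unfolded twice along range_mul_flat, gives the same list
lemma flat_eq (Lx Ly Lz : Int) (hLx : 1 ≤ Lx) (hLy : 1 ≤ Ly) (hLz : 1 ≤ Lz) :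
    (PySem.List.pyRange 0 (Lx * Ly * (Lz - 1)) 1).map (fun i => (i, i + Lx * Ly)) =
    (PySem.List.pyRange 0 (Lz - 1) 1).flatMap (fun z =>
      (PySem.List.pyRange 0 Ly 1).flatMap (fun y =>
        (PySem.List.pyRange 0 Lx 1).map (fun x =>
          (x + Lx * y + Lx * Ly * z, x + Lx * y + Lx * Ly * (z + 1))))) := by
  rw [range_mul_flat (Lx * Ly) (Lz - 1) (by positivity) (by omega),
      range_mul_flat Lx Ly (by omega) (by omega)]
  simp only [List.map_flatMap, List.map_map]
  apply List.flatMap_congr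
  intro z hz
  apply List.flatMap_congr
  intro y hy
  apply List.map_congr_left
  intro x hx
  simp only [Function.comp_apply]
  rw [Prod.mk.injEq]
  constructor <;> ring

-- ===== VERDICT (by name: the statement is the Claim_ definition above) =====
theorem cubic_z_pairs_spec : Claim_equal_cubic_z_pairs := by
  intro Lx Ly Lz _ hpre
  obtain ⟨hLx, hLy, hLz⟩ := hpre
  unfold Spec_cubic_z_pairs cubic_z_pairs cubic_z_pairs_alt
  rw [if_neg (by omega), if_neg (by omega), loops_eq Lx Ly Lz hLx hLy hLz,
      flat_eq Lx Ly Lz hLx hLy hLz]
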